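-- pv_equiv track=rewrite | github.com/YerevaNN/Cooja-Automation-ML | core/run/submitit_batch_sweep.py | organize_combinations_by_spacing
-- ===== SOURCE A (Python) =====
-- from typing import List, Tuple, Dict, Any, Set
--
-- def organize_combinations_by_spacing(
--     combinations: List[Tuple[int, int, int]]
-- ) -> Dict[int, List[Tuple[int, int]]]:
--     """Organize combinations by spacing value."""
--     spacing_groups = {}
--     for n, spacing, seed in combinations:
--         if spacing not in spacing_groups:
--             spacing_groups[spacing] = []
--         spacing_groups[spacing].append((n, seed))
--
--     return spacing_groups
-- ===== SOURCE B (Python) =====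
-- def organize_combinations_by_spacing(combinations):
--     """Organize combinations by spacing value (key order = first occurrence,
--     built by collecting distinct spacings then filtering once per key)."""
--     keys = list(dict.fromkeys(sp for _, sp, _ in combinations))
--     return {s: [(n, seed) for n, sp, seed in combinations if sp == s]
--             for s in keys}
-- ===== Notes on version B (the rewrite author's own statement) =====
-- stated objective: alternative
-- what changed: Replaced the single-pass dict-building loop (membership test + in-place append per element) by a two-phase decomposition: first collect the distinct spacing keys in first-occurrence order via dict.fromkeys, then build each group with one filtering comprehension per key.
import Mathlib
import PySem

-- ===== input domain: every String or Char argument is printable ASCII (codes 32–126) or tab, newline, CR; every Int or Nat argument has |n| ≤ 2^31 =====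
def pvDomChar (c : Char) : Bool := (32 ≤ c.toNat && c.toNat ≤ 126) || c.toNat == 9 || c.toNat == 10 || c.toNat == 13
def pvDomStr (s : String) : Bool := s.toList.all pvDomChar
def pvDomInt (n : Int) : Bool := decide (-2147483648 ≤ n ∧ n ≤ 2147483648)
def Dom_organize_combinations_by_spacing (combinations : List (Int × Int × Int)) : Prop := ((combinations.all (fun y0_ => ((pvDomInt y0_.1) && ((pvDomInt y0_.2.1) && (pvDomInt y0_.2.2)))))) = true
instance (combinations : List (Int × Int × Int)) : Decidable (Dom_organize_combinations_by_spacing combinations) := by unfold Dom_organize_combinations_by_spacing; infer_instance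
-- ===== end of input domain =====

-- B replaces A's single-pass dict-building loop by collecting the distinct spacing keys
-- first and then building each group by a filter pass per key (alternative decomposition,
-- same return value).

-- ===== PORT A =====
def organize_combinations_by_spacing (combinations : List (Int × Int × Int)) : List (Int × List (Int × Int)) :=
  (combinations.foldl (fun d c =>
      let d' := if d.contains c.2.1 then d else d.insert c.2.1 ([] : List (Int × Int))
      d'.modify c.2.1 [] (fun l => l ++ [(c.1, c.2.2)]))
    PySem.Dict.empty).items

-- ===== PORT B =====
def organize_combinations_by_spacing_alt (combinations : List (Int × Int × Int)) : List (Int × List (Int × Int)) :=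
  (PySem.List.dedup (combinations.map (fun c => c.2.1))).map (fun s =>
    (s, (combinations.filter (fun c => c.2.1 == s)).map (fun c => (c.1, c.2.2))))

-- ===== PRECONDITION & SPEC =====
def Spec_organize_combinations_by_spacing (combinations : List (Int × Int × Int)) (out : List (Int × List (Int × Int))) : Prop := out = organize_combinations_by_spacing_alt combinations
instance (combinations : List (Int × Int × Int)) (out : List (Int × List (Int × Int))) : Decidable (Spec_organize_combinations_by_spacing combinations out) := by unfold Spec_organize_combinations_by_spacing; infer_instance

-- ===== CLAIM (what is proved, stated in full; the proofs are below) =====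
def Claim_equal_organize_combinations_by_spacing : Prop := ∀ (combinations : List (Int × Int × Int)), Dom_organize_combinations_by_spacing combinations → Spec_organize_combinations_by_spacing combinations (organize_combinations_by_spacing combinations)

-- ===== LEMMAS AND PROOFS =====

-- A's "if not present, insert []; then append" step is modify with default [].
theorem stepA_eq_modify (d : PySem.Dict Int (List (Int × Int))) (k : Int) (x : Int × Int) :
    (if d.contains k then d else d.insert k ([] : List (Int × Int))).modify k [] (fun l => l ++ [x])
      = d.modify k [] (fun l => l ++ [x]) := by
  by_cases h : d.contains k
  · simp [h]
  · have hg : d.get? k = none := by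
      rw [PySem.Dict.get?_eq_none_iff_contains]; simpa using h
    simp [h, PySem.Dict.modify, PySem.Dict.get?_insert_self,
      PySem.Dict.insert_insert_self, PySem.Dict.getD_eq_get?_getD, hg]

theorem organize_foldl_eq (combinations : List (Int × Int × Int)) :
    combinations.foldl (fun d c =>
        let d' := if d.contains c.2.1 then d else d.insert c.2.1 ([] : List (Int × Int))
        d'.modify c.2.1 [] (fun l => l ++ [(c.1, c.2.2)])) PySem.Dict.empty
      = (combinations.map (fun c => (c.2.1, (c.1, c.2.2)))).foldl
          (fun d p => d.modify p.1 [] (fun l => l ++ [p.2])) PySem.Dict.empty := by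
  rw [List.foldl_map]
  congr 1
  funext d c
  exact stepA_eq_modify d c.2.1 (c.1, c.2.2)

-- ===== VERDICT (by name: the statement is the Claim_ definition above) =====
theorem organize_combinations_by_spacing_spec : Claim_equal_organize_combinations_by_spacing := by
  intro combinations _
  unfold Spec_organize_combinations_by_spacing
  unfold organize_combinations_by_spacing organize_combinations_by_spacing_alt
  rw [organize_foldl_eq]
  set l := combinations.map (fun c => (c.2.1, (c.1, c.2.2))) with hl
  set D := l.foldl (fun d p => d.modify p.1 [] (fun s => s ++ [p.2])) PySem.Dict.empty with hD
  have hkeys : D.keys = PySem.List.dedup (combinations.map (fun c => c.2.1)) := by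
    rw [hD, PySem.Dict.keys_foldl_modify_key]
    simp [hl, PySem.Set.update_nil_left, List.map_map, Function.comp_def]
  have hnodup : D.keys.Nodup := by
    rw [hkeys]; exact PySem.List.nodup_dedup _
  rw [PySem.Dict.items_eq_map_keys D hnodup ([] : List (Int × Int)), hkeys]
  apply List.map_congr_left
  intro k _
  have hget : D.getD k [] =
      (combinations.filter (fun c => c.2.1 == k)).map (fun c => (c.1, c.2.2)) := by
    rw [hD, PySem.Dict.getD_foldl_modify_append, PySem.Dict.getD_empty, hl]
    rw [List.filter_map, List.map_map]
    rfl
  rw [hget]
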